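-- pv_equiv track=rewrite | github.com/minhvinh20/streamlit-example | utils.py | count_repeated_number
-- ===== SOURCE A (Python) =====
-- from typing import List
--
-- def count_repeated_number(numbers: List[int]):
--     max_numbers = []
--     max_count = 0
--     for number in numbers:
--         number_count = numbers.count(number)
--         if number_count > max_count:
--             max_count = number_count
--     for number in numbers:
--         number_count = numbers.count(number)
--         if number_count == max_count and number not in max_numbers:
--             max_numbers.append(number)
--     if len(max_numbers) == len(numbers):
--         return None
--     return max_numbers
-- ===== SOURCE B (Python) =====
-- from typing import List
--
-- def count_repeated_number(numbers: List[int]):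
--     freq = {}
--     for number in numbers:
--         freq[number] = freq.get(number, 0) + 1
--     max_count = max(freq.values(), default=0)
--     max_numbers = [k for k, v in freq.items() if v == max_count]
--     if len(max_numbers) == len(numbers):
--         return None
--     return max_numbers
-- ===== Notes on version B (the rewrite author's own statement) =====
-- stated objective: faster
-- what changed: Replaced A's two O(n^2) passes (each calling numbers.count per element plus a 'not in' dedup scan) with one pass building an insertion-ordered frequency dict, max over its values, and a filter of its items.
import Mathlib
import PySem

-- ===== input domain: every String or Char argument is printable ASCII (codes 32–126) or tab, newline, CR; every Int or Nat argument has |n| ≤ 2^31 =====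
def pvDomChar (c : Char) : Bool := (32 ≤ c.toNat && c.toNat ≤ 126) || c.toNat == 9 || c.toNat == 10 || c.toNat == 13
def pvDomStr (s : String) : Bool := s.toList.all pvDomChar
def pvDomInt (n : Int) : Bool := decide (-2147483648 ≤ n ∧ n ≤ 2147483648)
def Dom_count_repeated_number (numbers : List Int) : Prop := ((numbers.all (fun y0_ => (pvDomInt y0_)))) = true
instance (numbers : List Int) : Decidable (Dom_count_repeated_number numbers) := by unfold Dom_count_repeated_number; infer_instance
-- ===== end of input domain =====

-- B replaces A's two passes that each call numbers.count inside the loop (plus a 'not in' scan)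
-- by one frequency dict built in a single pass, a max over its values, and a filter of its items.

-- ===== PORT A =====
def count_repeated_number (numbers : List Int) : Option (List Int) :=
  let max_count : Int := numbers.foldl
    (fun mc number => if (numbers.count number : Int) > mc then (numbers.count number : Int) else mc) 0
  let max_numbers : List Int := numbers.foldl
    (fun acc number => if (numbers.count number : Int) = max_count ∧ number ∉ acc then acc ++ [number] else acc) []
  if max_numbers.length = numbers.length then none else some max_numbers

-- ===== PORT B =====
def count_repeated_number_alt (numbers : List Int) : Option (List Int) :=
  let freq : PySem.Dict Int Int :=
    numbers.foldl (fun d number => d.insert number (d.getD number 0 + 1)) PySem.Dict.empty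
  let max_count : Int := PySem.List.maxD freq.values (fun v => v) 0
  let max_numbers : List Int := (freq.items.filter (fun p => p.2 == max_count)).map (fun p => p.1)
  if max_numbers.length = numbers.length then none else some max_numbers

-- ===== PRECONDITION & SPEC =====
def Spec_count_repeated_number (numbers : List Int) (out : Option (List Int)) : Prop := out = count_repeated_number_alt numbers
instance (numbers : List Int) (out : Option (List Int)) : Decidable (Spec_count_repeated_number numbers out) := by unfold Spec_count_repeated_number; infer_instance

-- ===== CLAIM (what is proved, stated in full; the proofs are below) =====
def Claim_equal_count_repeated_number : Prop := ∀ (numbers : List Int), Dom_count_repeated_number numbers → Spec_count_repeated_number numbers (count_repeated_number numbers)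

-- ===== LEMMAS AND PROOFS =====

-- A's second loop, started from any accumulator, appends the first occurrences (not already
-- in the accumulator) that satisfy P, i.e. it filters the ordered set of distinct elements.
lemma loopA_eq_filter_ofList (P : Int → Prop) [DecidablePred P] :
    ∀ (l acc : List Int),
      l.foldl (fun acc n => if P n ∧ n ∉ acc then acc ++ [n] else acc) acc
        = acc ++ (PySem.Set.ofList l).filter (fun n => decide (P n) && !acc.contains n) := by
  intro l
  induction l with
  | nil => intro acc; simp [PySem.Set.ofList]
  | cons n l ih =>
    intro acc
    rw [List.foldl_cons, PySem.Set.ofList_cons]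
    by_cases h : P n ∧ n ∉ acc
    · rw [if_pos h, ih]
      simp only [List.filter_cons, PySem.Set.discard, List.filter_filter]
      have hn : (decide (P n) && !acc.contains n) = true := by
        simp [h.1, h.2]
      rw [hn]
      simp only [List.append_assoc, List.cons_append, List.nil_append]
      congr 1
      congr 1
      apply List.filter_congr
      intro m _
      by_cases hm : m = n
      · subst hm
        rw [hn]
        simp
      · simp [hm]
    · rw [if_neg h, ih]
      simp only [List.filter_cons, PySem.Set.discard, List.filter_filter]
      have hn : (decide (P n) && !acc.contains n) = false := by
        rcases not_and_or.mp h with h1 | h2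
        · simp [h1]
        · simp [not_not.mp h2]
      rw [hn]
      simp only [Bool.false_eq_true, if_false]
      congr 1
      apply List.filter_congr
      intro m _
      by_cases hm : m = n
      · subst hm
        rw [hn]
        simp
      · simp [hm]

-- a running max over a list lands on the start value or on an element of the list
lemma foldl_max_attain : ∀ (t : List Int) (a : Int), t.foldl max a = a ∨ t.foldl max a ∈ t := by
  intro t
  induction t with
  | nil => intro a; left; rfl
  | cons x t ih =>
    intro a
    rw [List.foldl_cons]
    rcases ih (max a x) with h | h
    · rw [h]
      rcases max_choice a x with h' | h'
      · left; exact h'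
      · right; rw [h']; exact List.mem_cons_self
    · right; exact List.mem_cons_of_mem _ h

-- A's running-max loop over all counts equals B's max over the distinct elements' counts (default 0).
lemma max_counts_eq (numbers : List Int) :
    numbers.foldl (fun mc number => if (numbers.count number : Int) > mc then (numbers.count number : Int) else mc) 0
      = PySem.List.maxD ((PySem.Set.ofList numbers).map (fun k => (numbers.count k : Int))) (fun v => v) 0 := by
  have hstep : (fun (mc : Int) (number : Int) => if (numbers.count number : Int) > mc then (numbers.count number : Int) else mc)
      = fun mc number => max mc (numbers.count number : Int) := by
    funext mc n
    rw [max_def]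
    split_ifs <;> omega
  rw [hstep]
  have hfold : numbers.foldl (fun mc number => max mc (numbers.count number : Int)) 0
      = (numbers.map (fun n => (numbers.count n : Int))).foldl max 0 := by
    rw [List.foldl_map]
  rw [hfold]
  by_cases hne : numbers = []
  · subst hne; simp [PySem.List.maxD, PySem.List.max?, PySem.Set.ofList]
  · obtain ⟨n0, hn0⟩ := List.exists_mem_of_ne_nil numbers hne
    cases hmax : PySem.List.max? ((PySem.Set.ofList numbers).map (fun k => (numbers.count k : Int))) (fun v => v) with
    | none =>
      rw [PySem.List.max?_eq_none_iff] at hmax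
      rw [List.map_eq_nil_iff] at hmax
      have : n0 ∈ PySem.Set.ofList numbers := (PySem.Set.mem_ofList _ _).mpr hn0
      rw [hmax] at this
      simp at this
    | some m =>
      have hmem : m ∈ (PySem.Set.ofList numbers).map (fun k => (numbers.count k : Int)) :=
        PySem.List.max?_mem hmax
      have hmaxle := PySem.List.max?_isMax hmax
      have hub := (PySem.List.le_foldl_max (numbers.map (fun n => (numbers.count n : Int))) 0).2
      have hLm : (numbers.map (fun n => (numbers.count n : Int))).foldl max 0 ≤ m := by
        rcases foldl_max_attain (numbers.map (fun n => (numbers.count n : Int))) 0 with h0 | hL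
        · exfalso
          have h1 : (numbers.count n0 : Int) ≤ (numbers.map (fun n => (numbers.count n : Int))).foldl max 0 :=
            hub _ (List.mem_map_of_mem hn0)
          have h2 : 0 < numbers.count n0 := List.count_pos_iff.mpr hn0
          omega
        · obtain ⟨k, hk, hkL⟩ := List.mem_map.mp hL
          rw [← hkL]
          exact hmaxle _ (List.mem_map_of_mem ((PySem.Set.mem_ofList _ _).mpr hk))
      have hmL : m ≤ (numbers.map (fun n => (numbers.count n : Int))).foldl max 0 := by
        obtain ⟨j, hj, hjm⟩ := List.mem_map.mp hmem
        rw [← hjm]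
        exact hub _ (List.mem_map_of_mem ((PySem.Set.mem_ofList _ _).mp hj))
      rw [PySem.List.maxD, hmax]
      simp only [Option.getD_some]
      omega

-- ===== VERDICT (by name: the statement is the Claim_ definition above) =====
theorem count_repeated_number_spec : Claim_equal_count_repeated_number := by
  intro numbers _
  unfold Spec_count_repeated_number count_repeated_number count_repeated_number_alt
  simp only
  rw [PySem.Dict.foldl_insert_getD_add_one_eq_counter]
  have hvals : (PySem.Dict.counter numbers).values
      = (PySem.Set.ofList numbers).map (fun k => (numbers.count k : Int)) := by
    simp only [PySem.Dict.values, PySem.Dict.items_counter, List.map_map]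
    rfl
  rw [hvals, ← max_counts_eq numbers, PySem.Dict.items_counter]
  rw [loopA_eq_filter_ofList (fun n => (numbers.count n : Int)
        = numbers.foldl (fun mc number => if (numbers.count number : Int) > mc then (numbers.count number : Int) else mc) 0)
      numbers []]
  rw [List.filter_map, List.map_map]
  have hflt : (PySem.Set.ofList numbers).filter
        ((fun p : Int × Int => p.2 == numbers.foldl (fun mc number => if (numbers.count number : Int) > mc then (numbers.count number : Int) else mc) 0)
          ∘ (fun k => (k, (numbers.count k : Int))))
      = (PySem.Set.ofList numbers).filter
        (fun n => decide ((numbers.count n : Int)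
          = numbers.foldl (fun mc number => if (numbers.count number : Int) > mc then (numbers.count number : Int) else mc) 0) && !([] : List Int).contains n) := by
    apply List.filter_congr
    intro k _
    by_cases h : (numbers.count k : Int)
        = numbers.foldl (fun mc number => if (numbers.count number : Int) > mc then (numbers.count number : Int) else mc) 0
    · simp [h]
    · simp [h]
  rw [hflt]
  simp [Function.comp_def]
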